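-- pv_equiv track=rewrite | github.com/SRM-Hack/TrustGuard | backend/modules/fact_verifier.py | assess_claim_truthfulness
-- ===== SOURCE A (Python) =====
-- from typing import Any
--
-- def assess_claim_truthfulness(gfc_results: list[dict[str, Any]]) -> str:
--     """Classify truthfulness from fact-check textual ratings."""
--     try:
--         ratings = [
--             str(result.get("rating", "")).lower()
--             for result in gfc_results
--             if isinstance(result, dict)
--         ]
--
--         false_markers = {
--             "false",
--             "fake",
--             "wrong",
--             "misleading",
--             "incorrect",
--             "pants on fire",
--         }
--         true_markers = {"true", "correct", "accurate", "mostly true"}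
--
--         if any(any(marker in rating for marker in false_markers) for rating in ratings):
--             return "FALSE"
--         if any(any(marker in rating for marker in true_markers) for rating in ratings):
--             return "TRUE"
--         return "UNVERIFIED"
--     except Exception:
--         return "UNVERIFIED"
-- ===== SOURCE B (Python) =====
-- FALSE_MARKERS = ("false", "fake", "wrong", "misleading", "incorrect", "pants on fire")
-- TRUE_MARKERS = ("true", "correct", "accurate", "mostly true")
--
--
-- def _score(rating: str) -> int:
--     """Severity of one rating: 2 = false marker, 1 = true marker, 0 = neither."""
--     if any(m in rating for m in FALSE_MARKERS):
--         return 2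
--     if any(m in rating for m in TRUE_MARKERS):
--         return 1
--     return 0
--
--
-- def assess_claim_truthfulness(gfc_results):
--     best = 0
--     for result in gfc_results:
--         if isinstance(result, dict):
--             best = max(best, _score(str(result.get("rating", "")).lower()))
--     return "FALSE" if best == 2 else ("TRUE" if best == 1 else "UNVERIFIED")
-- ===== Notes on version B (the rewrite author's own statement) =====
-- stated objective: alternative
-- what changed: Replaces A's two separate existence scans (all-false-markers pass, then all-true-markers pass over the full ratings list) with a single fold that maps each rating to a numeric severity score (2/1/0) and keeps a running max, decoded to the verdict at the end.
import Mathlib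
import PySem

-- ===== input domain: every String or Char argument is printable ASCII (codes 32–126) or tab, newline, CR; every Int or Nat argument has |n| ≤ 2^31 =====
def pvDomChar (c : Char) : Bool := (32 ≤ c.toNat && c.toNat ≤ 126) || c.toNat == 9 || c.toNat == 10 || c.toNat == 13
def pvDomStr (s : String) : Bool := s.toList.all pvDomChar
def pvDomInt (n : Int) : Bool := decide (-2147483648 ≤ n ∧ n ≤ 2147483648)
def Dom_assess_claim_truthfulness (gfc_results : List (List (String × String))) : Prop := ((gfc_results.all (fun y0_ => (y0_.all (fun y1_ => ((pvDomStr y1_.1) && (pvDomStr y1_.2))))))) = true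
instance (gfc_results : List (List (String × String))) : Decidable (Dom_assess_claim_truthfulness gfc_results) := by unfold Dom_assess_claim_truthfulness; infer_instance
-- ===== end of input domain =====

-- One honest line: B replaces A's two sequential existence scans with a single
-- max-of-severity-scores fold decoded at the end (alternative decomposition, same cost).

-- ===== PORT A =====
def pvFalseMarkersA : List String :=
  ["false", "fake", "wrong", "misleading", "incorrect", "pants on fire"]
def pvTrueMarkersA : List String :=
  ["true", "correct", "accurate", "mostly true"]

-- rating of one result: str(result.get("rating", "")).lower()
def pvRatingA (result : List (String × String)) : String :=
  PySem.Str.lower ((PySem.Dict.ofList result).getD "rating" "")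

def assess_claim_truthfulness (gfc_results : List (List (String × String))) : String :=
  -- isinstance(result, dict) is always true under the type convention
  let ratings := gfc_results.map (fun result => pvRatingA result)
  if ratings.any (fun rating => pvFalseMarkersA.any (fun m => PySem.Str.isIn m rating)) then
    "FALSE"
  else if ratings.any (fun rating => pvTrueMarkersA.any (fun m => PySem.Str.isIn m rating)) then
    "TRUE"
  else
    "UNVERIFIED"

-- ===== PORT B =====
def pvFalseMarkersB : List String :=
  ["false", "fake", "wrong", "misleading", "incorrect", "pants on fire"]
def pvTrueMarkersB : List String :=
  ["true", "correct", "accurate", "mostly true"]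

def pvScore (rating : String) : Nat :=
  if pvFalseMarkersB.any (fun m => PySem.Str.isIn m rating) then 2
  else if pvTrueMarkersB.any (fun m => PySem.Str.isIn m rating) then 1
  else 0

def assess_claim_truthfulness_alt (gfc_results : List (List (String × String))) : String :=
  let best := gfc_results.foldl
    (fun b result =>
      max b (pvScore (PySem.Str.lower ((PySem.Dict.ofList result).getD "rating" "")))) 0
  if best = 2 then "FALSE" else if best = 1 then "TRUE" else "UNVERIFIED"

-- ===== PRECONDITION & SPEC =====
def Spec_assess_claim_truthfulness (gfc_results : List (List (String × String))) (out : String) : Prop := out = assess_claim_truthfulness_alt gfc_results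
instance (gfc_results : List (List (String × String))) (out : String) : Decidable (Spec_assess_claim_truthfulness gfc_results out) := by unfold Spec_assess_claim_truthfulness; infer_instance

-- ===== CLAIM (what is proved, stated in full; the proofs are below) =====
def Claim_equal_assess_claim_truthfulness : Prop := ∀ (gfc_results : List (List (String × String))), Dom_assess_claim_truthfulness gfc_results → Spec_assess_claim_truthfulness gfc_results (assess_claim_truthfulness gfc_results)

-- ===== LEMMAS AND PROOFS =====

-- proof-side abbreviations for the two existence scans and the maximal score of a list
def pvAnyFalse (l : List (List (String × String))) : Bool :=
  l.any (fun r => pvFalseMarkersB.any (fun m => PySem.Str.isIn m (pvRatingA r)))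
def pvAnyTrue (l : List (List (String × String))) : Bool :=
  l.any (fun r => pvTrueMarkersB.any (fun m => PySem.Str.isIn m (pvRatingA r)))
def pvM (l : List (List (String × String))) : Nat :=
  if pvAnyFalse l then 2 else if pvAnyTrue l then 1 else 0

theorem pv_score_eq (x : List (String × String)) :
    pvScore (PySem.Str.lower ((PySem.Dict.ofList x).getD "rating" "")) =
    if pvFalseMarkersB.any (fun m => PySem.Str.isIn m (pvRatingA x)) then 2
    else if pvTrueMarkersB.any (fun m => PySem.Str.isIn m (pvRatingA x)) then 1 else 0 := rfl

theorem pvM_cons (x : List (String × String)) (xs : List (List (String × String))) :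
    pvM (x :: xs) = max (pvScore (PySem.Str.lower ((PySem.Dict.ofList x).getD "rating" ""))) (pvM xs) := by
  rw [pv_score_eq]
  unfold pvM pvAnyFalse pvAnyTrue
  simp only [List.any_cons]
  rcases Bool.dichotomy (pvFalseMarkersB.any (fun m => PySem.Str.isIn m (pvRatingA x))) with h1 | h1 <;>
    rcases Bool.dichotomy (pvTrueMarkersB.any (fun m => PySem.Str.isIn m (pvRatingA x))) with h2 | h2 <;>
      rcases Bool.dichotomy (xs.any (fun r => pvFalseMarkersB.any (fun m => PySem.Str.isIn m (pvRatingA r)))) with h3 | h3 <;>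
        rcases Bool.dichotomy (xs.any (fun r => pvTrueMarkersB.any (fun m => PySem.Str.isIn m (pvRatingA r)))) with h4 | h4 <;>
          simp only [h1, h2, h3, h4] <;> simp

-- B's fold is the max of the accumulator and the maximal score of the list
theorem pv_fold_char (l : List (List (String × String))) (b : Nat) :
    l.foldl (fun b result =>
      max b (pvScore (PySem.Str.lower ((PySem.Dict.ofList result).getD "rating" "")))) b =
    max b (pvM l) := by
  induction l generalizing b with
  | nil => simp [pvM, pvAnyFalse, pvAnyTrue]
  | cons x xs ih =>
    rw [List.foldl_cons, ih, pvM_cons]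
    omega

theorem assess_eq (gfc_results : List (List (String × String))) :
    assess_claim_truthfulness gfc_results = assess_claim_truthfulness_alt gfc_results := by
  unfold assess_claim_truthfulness assess_claim_truthfulness_alt
  rw [pv_fold_char gfc_results 0, Nat.zero_max]
  have hAF : ((gfc_results.map (fun result => pvRatingA result)).any
        (fun rating => pvFalseMarkersA.any (fun m => PySem.Str.isIn m rating))) =
      pvAnyFalse gfc_results := by rw [List.any_map]; rfl
  have hAT : ((gfc_results.map (fun result => pvRatingA result)).any
        (fun rating => pvTrueMarkersA.any (fun m => PySem.Str.isIn m rating))) =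
      pvAnyTrue gfc_results := by rw [List.any_map]; rfl
  simp only [hAF, hAT]
  unfold pvM
  rcases Bool.dichotomy (pvAnyFalse gfc_results) with h1 | h1 <;>
    rcases Bool.dichotomy (pvAnyTrue gfc_results) with h2 | h2 <;>
      simp only [h1, h2] <;> simp

-- ===== VERDICT (by name: the statement is the Claim_ definition above) =====
theorem assess_claim_truthfulness_spec : Claim_equal_assess_claim_truthfulness := by
  intro g _
  unfold Spec_assess_claim_truthfulness
  exact assess_eq g
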